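-- pv_equiv track=rewrite | github.com/KI-AIM/Cinnamon | cinnamon-evaluation/visualization/vis_converter.py | group_metrics_by_visualization_type
-- ===== SOURCE A (Python) =====
-- def group_metrics_by_visualization_type(overview_metrics):
--     """
--     Organizes metrics by visualization type. Returns a dictionary with visualization types as keys and lists of
--     function names as values.
--
--     Args:
--         overview_metrics (dict): A dictionary containing the metrics for each visualization type.
--
--     Returns:
--         dict: A dictionary with visualization types as keys and lists of function names as values.
--     """
--     grouped_metrics = {}
--     category_key = next(iter(overview_metrics))
--     metrics_config = overview_metrics[category_key]['metrics']
--
--     # Loop through each metric configuration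
--     for metric_info in metrics_config:
--         visualization_type = metric_info['visualization_type']
--         function_name = metric_info['function_name']
--
--         # Initialize the visualization type list if not already present
--         if visualization_type not in grouped_metrics:
--             grouped_metrics[visualization_type] = []
--
--         grouped_metrics[visualization_type].append(function_name)
--
--     return grouped_metrics
-- ===== SOURCE B (Python) =====
-- def _partition_groups(metrics):
--     # Recursive partition: peel off the first visualization type, collect all its
--     # function names in one filtering pass, recurse on the remaining metrics.
--     if not metrics:
--         return {}
--     vt = metrics[0]['visualization_type']
--     names = [m['function_name'] for m in metrics if m['visualization_type'] == vt]
--     rest = [m for m in metrics if m['visualization_type'] != vt]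
--     out = {vt: names}
--     out.update(_partition_groups(rest))
--     return out
--
--
-- def group_metrics_by_visualization_type(overview_metrics):
--     category_key = next(iter(overview_metrics))
--     metrics_config = overview_metrics[category_key]['metrics']
--     return _partition_groups(metrics_config)
-- ===== Notes on version B (the rewrite author's own statement) =====
-- stated objective: alternative
-- what changed: Replaces A's single accumulating scan over a dict (check-membership, init, append per metric) with a recursive partition: repeatedly take the first remaining visualization type, gather all its function names by one filter pass, and recurse on the metrics of the other types.
import Mathlib
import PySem

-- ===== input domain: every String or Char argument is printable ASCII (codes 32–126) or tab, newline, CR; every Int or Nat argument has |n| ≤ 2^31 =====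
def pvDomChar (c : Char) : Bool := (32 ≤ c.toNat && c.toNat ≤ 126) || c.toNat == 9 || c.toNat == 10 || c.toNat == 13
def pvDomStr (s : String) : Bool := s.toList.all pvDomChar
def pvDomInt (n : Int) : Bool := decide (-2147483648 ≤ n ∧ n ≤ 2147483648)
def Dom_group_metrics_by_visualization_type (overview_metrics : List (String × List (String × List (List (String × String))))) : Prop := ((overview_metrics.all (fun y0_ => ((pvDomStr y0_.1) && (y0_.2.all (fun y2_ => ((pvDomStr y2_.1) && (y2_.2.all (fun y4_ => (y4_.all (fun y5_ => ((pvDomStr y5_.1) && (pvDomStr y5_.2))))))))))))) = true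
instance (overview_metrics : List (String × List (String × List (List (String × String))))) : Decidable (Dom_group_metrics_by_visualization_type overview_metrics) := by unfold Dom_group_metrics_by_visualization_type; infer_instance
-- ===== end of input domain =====

-- B replaces A's accumulating dict scan by a recursive partition on the first remaining
-- visualization type; objective: alternative (same observable result, not faster).

-- ===== PORT A =====
-- metric_info['visualization_type'] / ['function_name']; KeyError (= missing key) is excluded by Pre_, so the default "" is never read there
def pvVt (m : List (String × String)) : String := (PySem.Dict.mk m).getD "visualization_type" ""
def pvFn (m : List (String × String)) : String := (PySem.Dict.mk m).getD "function_name" ""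

def group_metrics_by_visualization_type (overview_metrics : List (String × List (String × List (List (String × String))))) : List (String × List String) :=
  match overview_metrics with
  | [] => []  -- next(iter({})) raises StopIteration; excluded by Pre_
  | p :: _ =>
    let category_key := p.1
    match (PySem.Dict.mk overview_metrics).get? category_key with
    | none => []  -- unreachable: the first key is always present
    | some v =>
      match (PySem.Dict.mk v).get? "metrics" with
      | none => []  -- KeyError 'metrics'; excluded by Pre_
      | some metrics_config =>
        (metrics_config.foldl
          (fun grouped metric_info =>
            let visualization_type := pvVt metric_info
            let function_name := pvFn metric_info
            let grouped := if grouped.contains visualization_type then grouped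
                           else grouped.insert visualization_type []
            grouped.modify visualization_type [] (fun l => l ++ [function_name]))
          PySem.Dict.empty).items

-- ===== PORT B =====
-- _partition_groups: names/rest are the two comprehensions; dict-literal + update is list cons
def pvPartitionGroups (metrics : List (List (String × String))) : List (String × List String) :=
  match metrics with
  | [] => []
  | m :: rest0 =>
    let vt := pvVt m
    let names := ((m :: rest0).filter (fun x => pvVt x == vt)).map pvFn
    let rest := (m :: rest0).filter (fun x => !(pvVt x == vt))
    (vt, names) :: pvPartitionGroups rest
termination_by metrics.length
decreasing_by
  simp only [List.filter_cons, beq_self_eq_true, Bool.not_true, Bool.false_eq_true, if_false,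
    List.length_cons]
  exact Nat.lt_succ_of_le (List.length_filter_le _ _)

def group_metrics_by_visualization_type_alt (overview_metrics : List (String × List (String × List (List (String × String))))) : List (String × List String) :=
  match overview_metrics with
  | [] => []
  | p :: _ =>
    match (((PySem.Dict.mk overview_metrics).get? p.1).bind
            (fun v => (PySem.Dict.mk v).get? "metrics")) with
    | none => []
    | some metrics_config => pvPartitionGroups metrics_config

-- ===== PRECONDITION & SPEC =====
-- Pre_ excludes exactly the inputs where the Python A raises: the empty dict (StopIteration),
-- a first value without a 'metrics' key, or a metric entry missing one of the two looked-up keys (KeyError).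
def Pre_group_metrics_by_visualization_type (overview_metrics : List (String × List (String × List (List (String × String))))) : Prop :=
  overview_metrics ≠ [] ∧
  (PySem.Dict.mk (overview_metrics.headD ("", [])).2).contains "metrics" = true ∧
  ((PySem.Dict.mk (overview_metrics.headD ("", [])).2).getD "metrics" []).all
    (fun m => (PySem.Dict.mk m).contains "visualization_type" &&
              (PySem.Dict.mk m).contains "function_name") = true
instance (overview_metrics : List (String × List (String × List (List (String × String))))) : Decidable (Pre_group_metrics_by_visualization_type overview_metrics) := by unfold Pre_group_metrics_by_visualization_type; infer_instance

def pvWitness_group_metrics_by_visualization_type : (List (String × List (String × List (List (String × String))))) :=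
  [("cat", [("metrics",
      [[("visualization_type", "bar"), ("function_name", "f1")],
       [("visualization_type", "pie"), ("function_name", "g")],
       [("visualization_type", "bar"), ("function_name", "f2")]])])]

def Spec_group_metrics_by_visualization_type (overview_metrics : List (String × List (String × List (List (String × String))))) (out : List (String × List String)) : Prop := out = group_metrics_by_visualization_type_alt overview_metrics
instance (overview_metrics : List (String × List (String × List (List (String × String))))) (out : List (String × List String)) : Decidable (Spec_group_metrics_by_visualization_type overview_metrics out) := by unfold Spec_group_metrics_by_visualization_type; infer_instance

-- ===== CLAIM (what is proved, stated in full; the proofs are below) =====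
def Claim_equal_group_metrics_by_visualization_type : Prop := ∀ (overview_metrics : List (String × List (String × List (List (String × String))))), Dom_group_metrics_by_visualization_type overview_metrics → Pre_group_metrics_by_visualization_type overview_metrics → Spec_group_metrics_by_visualization_type overview_metrics (group_metrics_by_visualization_type overview_metrics)

-- ===== LEMMAS AND PROOFS =====

-- removing an element from an ordered dedup commutes with removing it first
lemma discard_ofList (a : String) (l : List String) :
    PySem.Set.discard (PySem.Set.ofList l) a = PySem.Set.ofList (l.filter (fun y => !(y == a))) := by
  induction l with
  | nil => rfl
  | cons x xs ih =>
    simp only [PySem.Set.discard] at ih ⊢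
    by_cases h : x = a
    · subst h
      simpa [PySem.Set.ofList_cons, PySem.Set.discard] using ih
    · simp [PySem.Set.ofList_cons, PySem.Set.discard, h, List.filter_filter, ← ih,
        Bool.and_comm]

-- ordered dedup, unfolded one step
lemma dedup_cons (a : String) (l : List String) :
    PySem.List.dedup (a :: l) = a :: PySem.List.dedup (l.filter (fun y => !(y == a))) := by
  simp only [PySem.List.dedup_eq_ofList, PySem.Set.ofList_cons, discard_ofList]

-- A's 'initialize if absent, then append' step is exactly a modify with default []
lemma step_eq_modify (d : PySem.Dict String (List String)) (vt fn : String) :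
    (if d.contains vt then d else d.insert vt []).modify vt [] (fun l => l ++ [fn])
      = d.modify vt [] (fun l => l ++ [fn]) := by
  by_cases h : d.contains vt = true
  · simp [h]
  · have h' : d.contains vt = false := by simpa using h
    simp only [h', Bool.false_eq_true, if_false]
    unfold PySem.Dict.modify
    rw [PySem.Dict.getD_insert_self, PySem.Dict.insert_insert_self,
        PySem.Dict.getD_of_not_contains d [] h']

-- A's whole grouping loop, characterised as dedup-then-filter
lemma foldA_eq (mc : List (List (String × String))) :
    (mc.foldl
       (fun grouped metric_info =>
         let vt := pvVt metric_info
         let fn := pvFn metric_info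
         let grouped := if grouped.contains vt then grouped else grouped.insert vt []
         grouped.modify vt [] (fun l => l ++ [fn]))
       PySem.Dict.empty).items
    = (PySem.List.dedup (mc.map pvVt)).map (fun vt =>
        (vt, (mc.filter (fun m => pvVt m == vt)).map pvFn)) := by
  have hfun : (fun (grouped : PySem.Dict String (List String)) (metric_info : List (String × String)) =>
        let vt := pvVt metric_info
        let fn := pvFn metric_info
        let grouped := if grouped.contains vt then grouped else grouped.insert vt []
        grouped.modify vt [] (fun l => l ++ [fn]))
      = (fun (g : PySem.Dict String (List String)) m =>
          g.modify (pvVt m) [] (fun l => l ++ [pvFn m])) := by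
    funext g m
    exact step_eq_modify g (pvVt m) (pvFn m)
  rw [hfun]
  set D := mc.foldl
      (fun (g : PySem.Dict String (List String)) m =>
        g.modify (pvVt m) [] (fun l => l ++ [pvFn m])) PySem.Dict.empty with hD
  have hkeys : D.keys = PySem.List.dedup (mc.map pvVt) := by
    rw [hD, PySem.Dict.keys_foldl_modify_key mc pvVt [] (fun _ m l => l ++ [pvFn m])]
    rw [PySem.Dict.keys_empty, PySem.Set.update_nil_left, PySem.List.dedup_eq_ofList]
  have hnd : D.keys.Nodup := by
    rw [hD]
    exact PySem.Dict.nodup_keys_foldl_modify_key mc pvVt [] _ _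
      (by rw [PySem.Dict.keys_empty]; exact List.nodup_nil)
  have hget : ∀ c, D.getD c [] = (mc.filter (fun m => pvVt m == c)).map pvFn := by
    intro c
    have h := PySem.Dict.getD_foldl_modify_append
      (mc.map (fun m => (pvVt m, pvFn m))) PySem.Dict.empty c
    rw [List.foldl_map, List.filter_map, List.map_map] at h
    simpa [PySem.Dict.getD_empty, Function.comp] using h
  rw [PySem.Dict.items_eq_map_keys D hnd [], hkeys]
  exact List.map_congr_left (fun k _ => by rw [hget k])

-- B's partition recursion computes the same dedup-then-filter table
lemma pvPartitionGroups_eq (mc : List (List (String × String))) :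
    pvPartitionGroups mc
      = (PySem.List.dedup (mc.map pvVt)).map (fun vt =>
          (vt, (mc.filter (fun m => pvVt m == vt)).map pvFn)) := by
  induction mc using pvPartitionGroups.induct with
  | case1 => simp [pvPartitionGroups, PySem.List.dedup]
  | case2 m rest0 c rest ih =>
    rw [pvPartitionGroups, ih]
    simp only [List.map_cons, dedup_cons]
    congr 1
    have hmap : List.map pvVt rest = List.filter (fun y => !(y == pvVt m)) (List.map pvVt rest0) := by
      rw [List.filter_map]
      simp only [rest, c, List.filter_cons, beq_self_eq_true, Bool.not_true, Bool.false_eq_true,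
        if_false]
      rfl
    rw [← hmap]
    apply List.map_congr_left
    intro k hk
    have hkmem : k ∈ List.map pvVt rest := (PySem.List.mem_dedup _ _).1 hk
    obtain ⟨x, hx, hxk⟩ := List.mem_map.1 hkmem
    have hxpred := List.of_mem_filter hx
    have hkvt : k ≠ pvVt m := by
      rw [← hxk]
      simpa [c] using hxpred
    congr 1
    simp only [rest, c, List.filter_filter]
    rw [List.filter_cons]
    have hm : ((pvVt m == k) && !(pvVt m == pvVt m)) = false := by
      simp only [beq_self_eq_true, Bool.not_true, Bool.and_false]
    rw [hm]
    simp only [Bool.false_eq_true, if_false]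
    rw [List.filter_cons]
    have hm2 : (pvVt m == k) = false := beq_eq_false_iff_ne.2 (fun h => hkvt h.symm)
    rw [hm2]
    simp only [Bool.false_eq_true, if_false]
    apply congrArg
    apply List.filter_congr
    intro x _
    by_cases hx2 : pvVt x = k
    · simp [hx2, hkvt]
    · simp [hx2]

-- ===== VERDICT (by name: the statement is the Claim_ definition above) =====
theorem group_metrics_by_visualization_type_spec : Claim_equal_group_metrics_by_visualization_type := by
  intro om _ _
  unfold Spec_group_metrics_by_visualization_type group_metrics_by_visualization_type group_metrics_by_visualization_type_alt
  cases om with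
  | nil => rfl
  | cons p rest =>
    dsimp only
    cases h1 : (PySem.Dict.mk (p :: rest)).get? p.1 with
    | none => rfl
    | some v =>
      cases h2 : (PySem.Dict.mk v).get? "metrics" with
      | none => simp [h2]
      | some mc =>
        simp only [h2, Option.bind_some]
        rw [foldA_eq, pvPartitionGroups_eq]
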